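-- pv_equiv track=rewrite | github.com/sng87/paradigm-scripts | bin/mParadigm.py | getComponentMap
-- ===== SOURCE A (Python) =====
-- def reverseInteractions(interactions):
--     """reverse interaction mapping"""
--     rinteractions = {}
--     for source in interactions.keys():
--         for target in interactions[source].keys():
--             if target not in rinteractions:
--                 rinteractions[target] = {}
--             rinteractions[target][source] = interactions[source][target]
--     return(rinteractions)
--
-- def getComponentMap(pNodes, pInteractions):
--     """create the dictionary componentMap from interaction map"""
--     rpInteractions = reverseInteractions(pInteractions)
--     componentMap = dict()
--     for i in pNodes.keys():
--         if pNodes[i] != "complex":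
--             continue
--         componentMap[i] = []
--         if i not in rpInteractions:
--             continue
--         for j in rpInteractions[i]:
--             if rpInteractions[i][j] == "component>":
--                 componentMap[i].append(j)
--     return(componentMap)
-- ===== SOURCE B (Python) =====
-- def getComponentMap(pNodes, pInteractions):
--     """create the dictionary componentMap from interaction map"""
--     return {i: [source for source in pInteractions
--                 if pInteractions[source].get(i) == "component>"]
--             for i in pNodes if pNodes[i] == "complex"}
-- ===== Notes on version B (the rewrite author's own statement) =====
-- stated objective: simpler
-- what changed: Replaces the reverseInteractions pre-pass and the two-stage per-node loop by a single dict comprehension that, for each complex node, scans the interaction sources directly for a 'component>' edge into that node; no reversed interaction map is ever built.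
import Mathlib
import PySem

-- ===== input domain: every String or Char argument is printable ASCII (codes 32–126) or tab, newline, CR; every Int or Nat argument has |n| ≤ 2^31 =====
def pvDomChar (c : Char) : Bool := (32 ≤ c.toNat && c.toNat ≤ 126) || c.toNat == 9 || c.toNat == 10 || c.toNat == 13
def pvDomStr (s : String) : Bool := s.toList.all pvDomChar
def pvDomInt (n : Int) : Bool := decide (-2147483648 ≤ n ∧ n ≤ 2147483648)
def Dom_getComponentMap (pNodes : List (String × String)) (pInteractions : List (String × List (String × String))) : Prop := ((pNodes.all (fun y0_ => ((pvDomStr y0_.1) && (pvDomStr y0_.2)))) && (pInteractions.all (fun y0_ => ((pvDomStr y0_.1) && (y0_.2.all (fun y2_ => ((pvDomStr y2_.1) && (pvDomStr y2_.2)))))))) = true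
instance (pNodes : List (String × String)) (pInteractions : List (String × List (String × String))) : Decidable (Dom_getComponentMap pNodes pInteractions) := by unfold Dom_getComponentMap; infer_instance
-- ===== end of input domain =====

-- B replaces A's reverseInteractions pre-pass and two-stage per-node loop by one direct
-- comprehension (per complex node, scan the interaction sources); objective: simpler.

-- ===== PORT A =====
-- iterating a Python dict's keys, with the dict given as an association list:
-- the distinct keys in first-occurrence order (dict.keys() order)
def pvKeys {α β : Type} [BEq α] (l : List (α × β)) : List α :=
  PySem.List.dedup (l.map (·.1))

def reverseInteractions (interactions : List (String × List (String × String))) :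
    PySem.Dict String (PySem.Dict String String) :=
  (pvKeys interactions).foldl
    (fun r source =>
      (pvKeys ((PySem.Dict.mk interactions).getD source [])).foldl
        (fun r target =>
          -- 'if target not in rinteractions: rinteractions[target] = {}' is setdefault;
          -- 'rinteractions[target][source] = interactions[source][target]' is modify
          (r.setdefault target PySem.Dict.empty).modify target PySem.Dict.empty
            (fun inner => inner.insert source
              ((PySem.Dict.mk ((PySem.Dict.mk interactions).getD source [])).getD target "")))
        r)
    PySem.Dict.empty

def getComponentMap (pNodes : List (String × String))
    (pInteractions : List (String × List (String × String))) : List (String × List String) :=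
  ((pvKeys pNodes).foldl
    (fun cm i =>
      if (PySem.Dict.mk pNodes).getD i "" ≠ "complex" then cm
      else if (reverseInteractions pInteractions).contains i = false then
        cm.insert i ([] : List String)
      else
        (((reverseInteractions pInteractions).getD i PySem.Dict.empty).keys).foldl
          (fun cm j =>
            if ((reverseInteractions pInteractions).getD i PySem.Dict.empty).getD j "" = "component>"
            then cm.modify i ([] : List String) (fun l => l ++ [j]) else cm)
          (cm.insert i ([] : List String)))
    PySem.Dict.empty).items

-- ===== PORT B =====
def getComponentMap_alt (pNodes : List (String × String))
    (pInteractions : List (String × List (String × String))) : List (String × List String) :=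
  ((pvKeys pNodes).foldl
    (fun cm i =>
      if (PySem.Dict.mk pNodes).getD i "" = "complex" then
        cm.insert i ((pvKeys pInteractions).filter
          (fun source =>
            (PySem.Dict.mk ((PySem.Dict.mk pInteractions).getD source [])).get? i
              == some "component>"))
      else cm)
    PySem.Dict.empty).items

-- ===== PRECONDITION & SPEC =====
def Spec_getComponentMap (pNodes : List (String × String)) (pInteractions : List (String × List (String × String))) (out : List (String × List String)) : Prop := out = getComponentMap_alt pNodes pInteractions
instance (pNodes : List (String × String)) (pInteractions : List (String × List (String × String))) (out : List (String × List String)) : Decidable (Spec_getComponentMap pNodes pInteractions out) := by unfold Spec_getComponentMap; infer_instance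

-- ===== CLAIM (what is proved, stated in full; the proofs are below) =====
def Claim_equal_getComponentMap : Prop := ∀ (pNodes : List (String × String)) (pInteractions : List (String × List (String × String))), Dom_getComponentMap pNodes pInteractions → Spec_getComponentMap pNodes pInteractions (getComponentMap pNodes pInteractions)

-- ===== LEMMAS AND PROOFS =====

-- a modify at a key just inserted rewrites that key's value in place
theorem dict_insert_modify {κ ν : Type} [BEq κ] [LawfulBEq κ]
    (d : PySem.Dict κ ν) (k : κ) (v d0 : ν) (f : ν → ν) :
    (d.insert k v).modify k d0 f = d.insert k (f v) := by
  simp [PySem.Dict.modify, PySem.Dict.getD_insert_self, PySem.Dict.insert_insert_self]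

-- A's inner append loop, started right after 'componentMap[i] = []', is one insert of the filter
theorem foldl_ite_modify_append (p : String → Prop) [DecidablePred p] (i : String)
    (js : List String) :
    ∀ (cm : PySem.Dict String (List String)) (L : List String),
    js.foldl (fun cm j => if p j then cm.modify i ([] : List String) (fun l => l ++ [j]) else cm)
        (cm.insert i L)
      = cm.insert i (L ++ js.filter (fun j => decide (p j))) := by
  induction js with
  | nil => intro cm L; simp
  | cons j js ih =>
    intro cm L
    by_cases hj : p j
    · simp only [List.foldl_cons, if_pos hj, dict_insert_modify, List.filter_cons,
        decide_eq_true hj, ih]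
      simp
    · simp only [List.foldl_cons, if_neg hj, List.filter_cons, decide_eq_false hj, ih]
      simp

-- effect at key i of one source's target loop in reverseInteractions
theorem rev_inner_getD (pI : List (String × List (String × String))) (s : String)
    (ts : List String) :
    ∀ (r : PySem.Dict String (PySem.Dict String String)) (i : String),
    ((ts.foldl
        (fun r t =>
          (r.setdefault t PySem.Dict.empty).modify t PySem.Dict.empty
            (fun inner => inner.insert s
              ((PySem.Dict.mk ((PySem.Dict.mk pI).getD s [])).getD t ""))) r).getD i PySem.Dict.empty)
      = if i ∈ ts then
          (r.getD i PySem.Dict.empty).insert s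
            ((PySem.Dict.mk ((PySem.Dict.mk pI).getD s [])).getD i "")
        else r.getD i PySem.Dict.empty := by
  induction ts with
  | nil => intro r i; simp
  | cons t ts ih =>
    intro r i
    have hstep :
        (((r.setdefault t PySem.Dict.empty).modify t PySem.Dict.empty
            (fun inner => inner.insert s
              ((PySem.Dict.mk ((PySem.Dict.mk pI).getD s [])).getD t ""))).getD i PySem.Dict.empty)
          = if i = t then
              (r.getD i PySem.Dict.empty).insert s
                ((PySem.Dict.mk ((PySem.Dict.mk pI).getD s [])).getD i "")
            else r.getD i PySem.Dict.empty := by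
      rw [PySem.Dict.getD_modify]
      by_cases hit : i = t
      · subst hit
        simp [PySem.Dict.getD_setdefault_self]
      · simp [hit, PySem.Dict.getD_eq_get?_getD,
          PySem.Dict.get?_setdefault_of_ne _ _ hit]
    rw [List.foldl_cons, ih, hstep]
    by_cases hit : i = t
    · subst hit
      by_cases hmem : i ∈ ts
      · simp [hmem, PySem.Dict.insert_insert_self]
      · simp [hmem]
    · by_cases hmem : i ∈ ts
      · simp [hit, hmem]
      · simp [hit, hmem]

-- the value of reverseInteractions at key i, as a fold over the sources that mention i
theorem rev_getD (pI : List (String × List (String × String))) (ss : List String) :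
    ∀ (r : PySem.Dict String (PySem.Dict String String)) (i : String),
    ((ss.foldl
        (fun r source =>
          (pvKeys ((PySem.Dict.mk pI).getD source [])).foldl
            (fun r target =>
              (r.setdefault target PySem.Dict.empty).modify target PySem.Dict.empty
                (fun inner => inner.insert source
                  ((PySem.Dict.mk ((PySem.Dict.mk pI).getD source [])).getD target "")))
            r) r).getD i PySem.Dict.empty)
      = ((ss.filter (fun s => decide (i ∈ pvKeys ((PySem.Dict.mk pI).getD s [])))).foldl
          (fun inner s =>
            inner.insert s ((PySem.Dict.mk ((PySem.Dict.mk pI).getD s [])).getD i ""))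
          (r.getD i PySem.Dict.empty)) := by
  induction ss with
  | nil => intro r i; simp
  | cons s ss ih =>
    intro r i
    simp only [List.foldl_cons, ih, rev_inner_getD, List.filter_cons]
    by_cases hmem : i ∈ pvKeys ((PySem.Dict.mk pI).getD s [])
    · simp [hmem]
    · simp [hmem]

-- per complex node i, A's collected list equals B's direct filter over the sources
theorem lists_eq (pI : List (String × List (String × String))) (i : String) :
    ((((reverseInteractions pI).getD i PySem.Dict.empty).keys).filter
        (fun j => decide (((reverseInteractions pI).getD i PySem.Dict.empty).getD j "" = "component>")))
      = (pvKeys pI).filter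
          (fun source =>
            (PySem.Dict.mk ((PySem.Dict.mk pI).getD source [])).get? i == some "component>") := by
  have hrev : (reverseInteractions pI).getD i PySem.Dict.empty
      = (((pvKeys pI).filter (fun s => decide (i ∈ pvKeys ((PySem.Dict.mk pI).getD s [])))).foldl
          (fun inner s =>
            inner.insert s ((PySem.Dict.mk ((PySem.Dict.mk pI).getD s [])).getD i ""))
          PySem.Dict.empty) := by
    simp only [reverseInteractions]
    rw [rev_getD, PySem.Dict.getD_empty]
  set l := (pvKeys pI).filter (fun s => decide (i ∈ pvKeys ((PySem.Dict.mk pI).getD s []))) with hl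
  have hnd : l.Nodup := (PySem.List.nodup_dedup _).filter _
  have hitems : ((reverseInteractions pI).getD i PySem.Dict.empty).items
      = l.map (fun s => (s, (PySem.Dict.mk ((PySem.Dict.mk pI).getD s [])).getD i "")) := by
    rw [hrev]
    rw [PySem.Dict.items_foldl_insert_fresh l (fun s => s)
      (fun s => (PySem.Dict.mk ((PySem.Dict.mk pI).getD s [])).getD i "") PySem.Dict.empty
      (fun a _ => PySem.Dict.contains_empty a) (by simpa using hnd)]
    rfl
  have hkeys : ((reverseInteractions pI).getD i PySem.Dict.empty).keys = l := by
    simp only [PySem.Dict.keys, hitems, List.map_map]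
    exact List.map_id l
  have hknd : ((reverseInteractions pI).getD i PySem.Dict.empty).keys.Nodup := hkeys ▸ hnd
  have hgetD : ∀ j ∈ l, ((reverseInteractions pI).getD i PySem.Dict.empty).getD j ""
      = (PySem.Dict.mk ((PySem.Dict.mk pI).getD j [])).getD i "" := by
    intro j hj
    exact PySem.Dict.getD_of_mem_items _ (hitems ▸ List.mem_map_of_mem hj) hknd ""
  rw [hkeys, List.filter_congr (fun j hj => by rw [hgetD j hj]), hl, List.filter_filter]
  refine List.filter_congr ?_
  intro s _
  by_cases hmem : i ∈ pvKeys ((PySem.Dict.mk pI).getD s [])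
  · have hsome : (PySem.Dict.mk ((PySem.Dict.mk pI).getD s [])).get? i ≠ none := by
      rw [ne_eq, PySem.Dict.get?_eq_none_iff_not_mem_keys]
      intro hno
      apply hno
      simpa [pvKeys, PySem.List.mem_dedup, PySem.Dict.keys_mk] using hmem
    obtain ⟨w, hw⟩ := Option.ne_none_iff_exists'.mp hsome
    have hval : (PySem.Dict.mk ((PySem.Dict.mk pI).getD s [])).getD i "" = w := by
      rw [PySem.Dict.getD_eq_get?_getD, hw]; rfl
    rw [hval, hw]
    by_cases hwc : w = "component>"
    · simp [hwc, hmem]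
    · simp [hwc, hmem]
  · have hnone : (PySem.Dict.mk ((PySem.Dict.mk pI).getD s [])).get? i = none := by
      rw [PySem.Dict.get?_eq_none_iff_not_mem_keys]
      intro hyes
      apply hmem
      simpa [pvKeys, PySem.List.mem_dedup, PySem.Dict.keys_mk] using hyes
    simp [hnone, hmem]

-- A's whole per-node step equals B's per-node step
theorem step_eq (pNodes : List (String × String)) (pI : List (String × List (String × String)))
    (cm : PySem.Dict String (List String)) (i : String) :
    (if (PySem.Dict.mk pNodes).getD i "" ≠ "complex" then cm
      else if (reverseInteractions pI).contains i = false then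
        cm.insert i ([] : List String)
      else
        (((reverseInteractions pI).getD i PySem.Dict.empty).keys).foldl
          (fun cm j =>
            if ((reverseInteractions pI).getD i PySem.Dict.empty).getD j "" = "component>"
            then cm.modify i ([] : List String) (fun l => l ++ [j]) else cm)
          (cm.insert i ([] : List String)))
      = (if (PySem.Dict.mk pNodes).getD i "" = "complex" then
          cm.insert i ((pvKeys pI).filter
            (fun source =>
              (PySem.Dict.mk ((PySem.Dict.mk pI).getD source [])).get? i == some "component>"))
        else cm) := by
  by_cases hcx : (PySem.Dict.mk pNodes).getD i "" = "complex"
  · rw [if_neg (by simpa using hcx), if_pos hcx]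
    by_cases hc : (reverseInteractions pI).contains i
    · rw [if_neg (by simp [hc])]
      rw [foldl_ite_modify_append
        (fun j => ((reverseInteractions pI).getD i PySem.Dict.empty).getD j "" = "component>") i]
      rw [List.nil_append, lists_eq]
    · rw [if_pos (by simpa using hc)]
      have hempty : (reverseInteractions pI).getD i PySem.Dict.empty = PySem.Dict.empty :=
        PySem.Dict.getD_of_not_contains _ _ (by simpa using hc)
      have h0 := lists_eq pI i
      rw [hempty] at h0
      simp only [PySem.Dict.keys_empty, List.filter_nil] at h0
      rw [← h0]
  · rw [if_pos (by simpa using hcx), if_neg hcx]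

-- ===== VERDICT (by name: the statement is the Claim_ definition above) =====
theorem getComponentMap_spec : Claim_equal_getComponentMap := by
  intro pNodes pInteractions _
  unfold Spec_getComponentMap
  unfold getComponentMap getComponentMap_alt
  have hf := funext (fun cm : PySem.Dict String (List String) =>
    funext (fun i : String => step_eq pNodes pInteractions cm i))
  rw [hf]
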